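-- pv_equiv track=rewrite | github.com/pypi-data/pypi-mirror-330 | packages/mag-tools/mag_tools-0.2.190.tar.gz/mag_tools-0.2.190/mag_tools/utils/data/list_utils.py | pick_block
-- ===== SOURCE A (Python) =====
-- from typing import Any, Dict, List, Optional, Tuple
--
-- def pick_block(lines: List[str], begin_keyword: str, end_keyword: str) -> List[str]:
--     if begin_keyword:
--         start_index: Optional[int] = next((i for i, line in enumerate(lines) if begin_keyword in line.strip()), None)
--     else:
--         start_index: Optional[int] = next((i for i, line in enumerate(lines) if not line.strip()), None)
--
--     if start_index is None:
--         return []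
--
--     if end_keyword:
--         end_index: Optional[int] = next((i for i, line in enumerate(lines) if end_keyword in line.strip() and i > start_index), None)
--     else:
--         end_index: Optional[int] = next((i for i, line in enumerate(lines) if not line.strip() and i > start_index), None)
--     return lines[start_index:end_index+1] if start_index is not None and end_index is not None else []
-- ===== SOURCE B (Python) =====
-- def pick_block(lines, begin_keyword, end_keyword):
--     def matches(line, kw):
--         s = line.strip()
--         return (kw in s) if kw else (not s)
--
--     block = None  # the block being built, starting at the begin line
--     for line in lines:
--         if block is None:
--             if matches(line, begin_keyword):
--                 block = [line]
--         else:
--             block.append(line)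
--             if matches(line, end_keyword):
--                 return block
--     return []
-- ===== Notes on version B (the rewrite author's own statement) =====
-- stated objective: alternative
-- what changed: A computes a start index and an end index with two separate next()-scans over enumerate(lines) and returns a slice; B never computes indices at all: one pass that, once the begin line matches, accumulates the lines themselves into the output block and returns it the moment the end line matches.
import Mathlib
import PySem

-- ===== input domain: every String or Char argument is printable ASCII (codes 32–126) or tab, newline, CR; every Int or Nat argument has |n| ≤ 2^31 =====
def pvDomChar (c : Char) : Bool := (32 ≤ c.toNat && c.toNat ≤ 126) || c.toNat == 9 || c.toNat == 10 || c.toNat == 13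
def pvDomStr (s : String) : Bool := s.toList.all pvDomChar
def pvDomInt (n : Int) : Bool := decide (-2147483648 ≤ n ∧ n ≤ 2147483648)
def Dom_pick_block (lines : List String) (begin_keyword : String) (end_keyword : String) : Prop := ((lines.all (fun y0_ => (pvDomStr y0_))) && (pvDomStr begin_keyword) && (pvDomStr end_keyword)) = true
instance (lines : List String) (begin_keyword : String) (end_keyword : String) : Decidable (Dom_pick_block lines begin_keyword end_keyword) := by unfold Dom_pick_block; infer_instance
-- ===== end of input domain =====

-- B replaces A's index arithmetic (two next()-scans over enumerate producing indices, then a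
-- slice) by a single pass that accumulates the block's lines themselves (objective: alternative).

-- ===== PORT A =====
-- literal transliteration of A: two find?-scans over enumerate, then a slice
def pick_block (lines : List String) (begin_keyword : String) (end_keyword : String) : List String :=
  let start_index : Option Int :=
    if !(begin_keyword == "") then
      ((PySem.List.enumerate lines 0).find? (fun p => PySem.Str.isIn begin_keyword (PySem.Str.strip p.2))).map (·.1)
    else
      ((PySem.List.enumerate lines 0).find? (fun p => PySem.Str.strip p.2 == "")).map (·.1)
  match start_index with
  | none => []
  | some si =>
    let end_index : Option Int :=
      if !(end_keyword == "") then
        ((PySem.List.enumerate lines 0).find? (fun p => PySem.Str.isIn end_keyword (PySem.Str.strip p.2) && si < p.1)).map (·.1)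
      else
        ((PySem.List.enumerate lines 0).find? (fun p => (PySem.Str.strip p.2 == "") && si < p.1)).map (·.1)
    match end_index with
    | none => []
    | some ei => PySem.List.slice lines (some si) (some (ei + 1))

-- ===== PORT B =====
-- Source B's helper: matches(line, kw) = (kw in line.strip()) if kw else (not line.strip())
def pbMatches (line kw : String) : Bool :=
  let s := PySem.Str.strip line
  if !(kw == "") then PySem.Str.isIn kw s else s == ""

-- Source B's loop: block = None until the begin line matches; then the block itself is
-- accumulated line by line and returned as soon as the end line matches.
def pbLoop (bkw ekw : String) : List String → Option (List String) → List String
  | [], _ => []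
  | line :: rest, none =>
      pbLoop bkw ekw rest (if pbMatches line bkw then some [line] else none)
  | line :: rest, some block =>
      let block' := block ++ [line]
      if pbMatches line ekw then block' else pbLoop bkw ekw rest (some block')

def pick_block_alt (lines : List String) (begin_keyword : String) (end_keyword : String) : List String :=
  pbLoop begin_keyword end_keyword lines none

-- ===== PRECONDITION & SPEC =====
def Spec_pick_block (lines : List String) (begin_keyword : String) (end_keyword : String) (out : List String) : Prop := out = pick_block_alt lines begin_keyword end_keyword
instance (lines : List String) (begin_keyword : String) (end_keyword : String) (out : List String) : Decidable (Spec_pick_block lines begin_keyword end_keyword out) := by unfold Spec_pick_block; infer_instance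

-- ===== CLAIM (what is proved, stated in full; the proofs are below) =====
def Claim_equal_pick_block : Prop := ∀ (lines : List String) (begin_keyword : String) (end_keyword : String), Dom_pick_block lines begin_keyword end_keyword → Spec_pick_block lines begin_keyword end_keyword (pick_block lines begin_keyword end_keyword)

-- ===== LEMMAS AND PROOFS =====

theorem findEnum (p : String → Bool) (lines : List String) (s : Int) :
    ((PySem.List.enumerate lines s).find? (fun pr => p pr.2)).map (·.1)
      = (lines.findIdx? p).map (fun k => s + (k : Int)) := by
  induction lines generalizing s with
  | nil => simp [PySem.List.enumerate_nil]
  | cons l rest ih =>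
    rw [PySem.List.enumerate_cons, List.find?_cons, List.findIdx?_cons]
    by_cases h : p l
    · simp [h]
    · simp only [h, Bool.false_eq_true, if_false, ih (s + 1)]
      cases rest.findIdx? p
      · simp
      · simp; omega

theorem findEnumAfter (q : String → Bool) (lines : List String) (s : Int) (si : Int)
    (hs : si < s) :
    ((PySem.List.enumerate lines s).find? (fun pr => q pr.2 && si < pr.1)).map (·.1)
      = ((PySem.List.enumerate lines s).find? (fun pr => q pr.2)).map (·.1) := by
  induction lines generalizing s with
  | nil => simp [PySem.List.enumerate_nil]
  | cons l rest ih =>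
    rw [PySem.List.enumerate_cons, List.find?_cons, List.find?_cons]
    have h1 : decide (si < s) = true := by simpa using hs
    by_cases h : q l
    · simp [h, h1]
    · simp only [h, Bool.false_and]
      simpa [h] using ih (s + 1) (by omega)

theorem endScan (q : String → Bool) (lines : List String) (si : Nat) (hsi : si < lines.length) :
    ((PySem.List.enumerate lines 0).find? (fun pr => q pr.2 && (si : Int) < pr.1)).map (·.1)
      = ((lines.drop (si + 1)).findIdx? q).map (fun m => ((si : Int) + 1 + (m : Int))) := by
  have hlen : (lines.take (si + 1)).length = si + 1 := by
    simp [Nat.min_eq_left (by omega : si + 1 ≤ lines.length)]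
  have hsplit : lines = lines.take (si + 1) ++ lines.drop (si + 1) := by simp
  conv_lhs => rw [hsplit]
  rw [PySem.List.enumerate_append, List.find?_append]
  have hfst : (PySem.List.enumerate (lines.take (si + 1)) 0).find?
      (fun pr => q pr.2 && (si : Int) < pr.1) = none := by
    rw [List.find?_eq_none]
    intro pr hpr
    rcases (PySem.List.mem_enumerate_iff _ _ _).1 hpr with ⟨k, hk, rfl⟩
    rw [hlen] at hk
    simp only [Bool.and_eq_true, decide_eq_true_eq]
    rintro ⟨-, hlt⟩
    omega
  rw [hfst, Option.none_or, hlen,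
      findEnumAfter q _ _ (si : Int) (by push_cast; omega),
      findEnum q _ ((0 : Int) + (si + 1 : Nat))]
  cases (lines.drop (si + 1)).findIdx? q
  · simp
  · simp

theorem findEnum0 (p : String → Bool) (lines : List String) :
    ((PySem.List.enumerate lines 0).find? (fun pr => p pr.2)).map (·.1)
      = (lines.findIdx? p).map (fun k => (k : Int)) := by
  rw [findEnum p lines 0]
  cases lines.findIdx? p
  · simp
  · simp

-- once the block is open, pbLoop appends up to and including the first end match
theorem pbLoop_some (bk ek : String) (rest : List String) (acc : List String) :
    pbLoop bk ek rest (some acc)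
      = (match rest.findIdx? (fun l => pbMatches l ek) with
          | none => []
          | some m => acc ++ rest.take (m + 1)) := by
  induction rest generalizing acc with
  | nil => simp [pbLoop]
  | cons l rest ih =>
    rw [pbLoop, List.findIdx?_cons]
    by_cases h : pbMatches l ek
    · simp [h]
    · simp only [h, Bool.false_eq_true, if_false, ih]
      cases rest.findIdx? (fun l => pbMatches l ek)
      · simp
      · simp

theorem pbLoop_none (bk ek : String) (lines : List String) :
    pbLoop bk ek lines none
      = ((lines.findIdx? (fun l => pbMatches l bk)).bind (fun k =>
          ((lines.drop (k + 1)).findIdx? (fun l => pbMatches l ek)).map (fun m =>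
            (lines.drop k).take (m + 2)))).getD [] := by
  induction lines with
  | nil => simp [pbLoop]
  | cons l rest ih =>
    rw [pbLoop, List.findIdx?_cons]
    by_cases h : pbMatches l bk
    · simp only [h, if_true, pbLoop_some, List.drop_succ_cons, List.drop_zero,
        Option.bind_some]
      cases rest.findIdx? (fun l => pbMatches l ek) <;> simp
    · simp only [h, Bool.false_eq_true, if_false, ih]
      cases hk : rest.findIdx? (fun l => pbMatches l bk) with
      | none => simp
      | some k =>
        simp only [Option.map_some, Option.bind_some, List.drop_succ_cons]

-- ===== VERDICT (by name: the statement is the Claim_ definition above) =====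
theorem pick_block_spec : Claim_equal_pick_block := by
  intro lines bk ek _
  unfold Spec_pick_block pick_block pick_block_alt
  rw [pbLoop_none]
  have H1 : (if !(bk == "") then
        ((PySem.List.enumerate lines 0).find? (fun p => PySem.Str.isIn bk (PySem.Str.strip p.2))).map (·.1)
      else
        ((PySem.List.enumerate lines 0).find? (fun p => PySem.Str.strip p.2 == "")).map (·.1))
      = ((PySem.List.enumerate lines 0).find? (fun p => pbMatches p.2 bk)).map (·.1) := by
    by_cases h : bk == "" <;> simp only [h, Bool.not_true, Bool.not_false, Bool.false_eq_true,
      if_false, if_true] <;> simp [pbMatches, h]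
  have H2 : ∀ si : Int, (if !(ek == "") then
        ((PySem.List.enumerate lines 0).find? (fun p => PySem.Str.isIn ek (PySem.Str.strip p.2) && si < p.1)).map (·.1)
      else
        ((PySem.List.enumerate lines 0).find? (fun p => (PySem.Str.strip p.2 == "") && si < p.1)).map (·.1))
      = ((PySem.List.enumerate lines 0).find? (fun p => pbMatches p.2 ek && si < p.1)).map (·.1) := by
    intro si
    by_cases h : ek == "" <;> simp only [h, Bool.not_true, Bool.not_false, Bool.false_eq_true,
      if_false, if_true] <;> simp [pbMatches, h]
  simp only [H1, H2]
  rw [findEnum0 (fun l => pbMatches l bk) lines]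
  cases hk : lines.findIdx? (fun l => pbMatches l bk) with
  | none => simp
  | some k =>
    have hklt : k < lines.length := (List.findIdx?_eq_some_iff_findIdx_eq.mp hk).1
    simp only [Option.map_some, Option.bind_some, Option.pure_def, Option.bind_eq_bind]
    rw [endScan (fun l => pbMatches l ek) lines k hklt]
    cases (lines.drop (k + 1)).findIdx? (fun l => pbMatches l ek) with
    | none => simp
    | some m =>
      simp only [Option.pure_def, Option.bind_eq_bind, Option.bind_some, Option.map_some,
        Option.getD_some]
      have hcast : (k : Int) + 1 + (m : Int) + 1 = (k : Int) + ((m + 2 : Nat) : Int) := by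
        push_cast; ring
      rw [hcast, PySem.List.slice_natCast_add]
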